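-- pv_equiv track=rewrite | github.com/poolboy17/cursedtours | semanticpipe.py | trim_title
-- ===== SOURCE A (Python) =====
-- def trim_title(title, max_len=60):
--     """Intelligently trim title to <=60 chars while keeping keyword intent."""
--     if len(title) <= max_len:
--         return title
--     # Strategy 1: Remove subtitle after colon/dash if present
--     for sep in [': ', ' — ', ' - ', ' | ']:
--         if sep in title:
--             main, sub = title.split(sep, 1)
--             if len(main) <= max_len and len(main) >= 25:
--                 return main
--             # Try keeping main + shortened sub
--             available = max_len - len(main) - len(sep)
--             if available > 10:
--                 words = sub.split()
--                 shortened = []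
--                 for w in words:
--                     test = sep.join([main, ' '.join(shortened + [w])])
--                     if len(test) <= max_len:
--                         shortened.append(w)
--                     else:
--                         break
--                 if shortened:
--                     return sep.join([main, ' '.join(shortened)])
--                 return main[:max_len]
--     # Strategy 2: Remove filler words from end
--     words = title.split()
--     while len(' '.join(words)) > max_len and len(words) > 3:
--         words.pop()
--     return ' '.join(words)
-- ===== SOURCE B (Python) =====
-- def _fit(words, run, max_len):
--     """Largest k with run + len(' '.join(words[:k])) <= max_len, via running prefix length sums."""
--     k = 0
--     for w in words:
--         run += len(w) + (1 if k else 0)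
--         if run > max_len:
--             break
--         k += 1
--     return k
--
--
-- def trim_title(title, max_len=60):
--     if len(title) <= max_len:
--         return title
--     for sep in [': ', ' — ', ' - ', ' | ']:
--         if sep in title:
--             main, sub = title.split(sep, 1)
--             if 25 <= len(main) <= max_len:
--                 return main
--             if max_len - len(main) - len(sep) > 10:
--                 words = sub.split()
--                 k = _fit(words, len(main) + len(sep), max_len)
--                 if k > 0:
--                     return sep.join([main, ' '.join(words[:k])])
--                 return main[:max_len]
--     words = title.split()
--     k = min(len(words), max(3, _fit(words, 0, max_len)))
--     return ' '.join(words[:k])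
-- ===== Notes on version B (the rewrite author's own statement) =====
-- stated objective: faster
-- what changed: Both the strategy-1 word-fitting loop (which rebuilt and measured sep.join([main, ' '.join(prefix)]) for every candidate word) and the strategy-2 pop-and-rejoin while loop are replaced by one shared linear helper _fit that walks the word list once keeping a running prefix-length sum and returns the cut index k directly; the result is then produced by a single join of words[:k].
import Mathlib
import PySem

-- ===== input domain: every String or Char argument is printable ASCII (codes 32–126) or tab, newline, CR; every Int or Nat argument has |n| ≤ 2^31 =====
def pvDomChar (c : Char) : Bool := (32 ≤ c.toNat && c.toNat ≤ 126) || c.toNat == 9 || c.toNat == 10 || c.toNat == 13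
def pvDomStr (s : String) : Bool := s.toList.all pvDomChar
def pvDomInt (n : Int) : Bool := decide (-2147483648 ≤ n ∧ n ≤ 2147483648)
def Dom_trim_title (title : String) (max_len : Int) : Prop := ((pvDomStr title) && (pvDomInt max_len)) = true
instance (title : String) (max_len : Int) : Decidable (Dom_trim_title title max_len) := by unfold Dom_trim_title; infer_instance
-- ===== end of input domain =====

-- B replaces A's quadratic rebuild-and-measure joins (strategy 1's growing sep.join test and
-- strategy 2's pop-while-rejoining loop) by one shared linear pass over prefix length sums that
-- picks the cut index k directly; return values are identical on every input.

-- ===== PORT A =====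
-- the separators [': ', ' — ', ' - ', ' | '] (shared literal data of both ports)
def pvSeps : List (List Char) := [[':', ' '], [' ', '—', ' '], [' ', '-', ' '], [' ', '|', ' ']]

-- A's inner loop: 'for w in words: test = sep.join([main, ' '.join(shortened+[w])]); …'
def pvTryFitA (sep main : List Char) (max_len : Int) : List (List Char) → List (List Char) → List (List Char)
  | [], acc => acc
  | w :: ws, acc =>
    let test := PySem.Chars.join sep [main, PySem.Chars.join [' '] (acc ++ [w])]
    if (test.length : Int) ≤ max_len then pvTryFitA sep main max_len ws (acc ++ [w]) else acc

-- A's strategy 2: 'while len(' '.join(words)) > max_len and len(words) > 3: words.pop()'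
def pvPopLoopA (max_len : Int) (ws : List (List Char)) : List (List Char) :=
  if _h : max_len < ((PySem.Chars.join [' '] ws).length : Int) ∧ 3 < ws.length then
    pvPopLoopA max_len ws.dropLast
  else ws
termination_by ws.length
decreasing_by simp [List.length_dropLast]; omega

-- A's 'for sep in [...]' with its early returns (none = fell through to strategy 2);
-- 'main, sub = title.split(sep, 1)' read off the two pieces the guarded split yields
def pvStrat1A (t : List Char) (max_len : Int) : List (List Char) → Option (List Char)
  | [] => none
  | sep :: seps =>
    if PySem.Chars.isIn sep t then
      let parts := PySem.Chars.splitOnMax t sep 1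
      let main := parts.headD []
      let sub := parts.getD 1 []
      if (main.length : Int) ≤ max_len ∧ 25 ≤ (main.length : Int) then some main
      else if 10 < max_len - main.length - sep.length then
        let shortened := pvTryFitA sep main max_len (PySem.Chars.split₀ sub) []
        if shortened ≠ [] then some (PySem.Chars.join sep [main, PySem.Chars.join [' '] shortened])
        else some (PySem.List.slice main none (some max_len))
      else pvStrat1A t max_len seps
    else pvStrat1A t max_len seps

def trim_title (title : String) (max_len : Int) : String :=
  let t := title.toList
  if (t.length : Int) ≤ max_len then title
  else
    match pvStrat1A t max_len pvSeps with
    | some r => String.ofList r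
    | none => String.ofList (PySem.Chars.join [' '] (pvPopLoopA max_len (PySem.Chars.split₀ t)))

-- ===== PORT B =====
-- B's '_fit': largest k with run + len(' '.join(words[:k])) <= max_len, by running length sums
def pvFit (max_len : Int) : List (List Char) → Int → Nat → Nat
  | [], _, k => k
  | w :: ws, run, k =>
    let run' := run + w.length + (if 0 < k then 1 else 0)
    if max_len < run' then k else pvFit max_len ws run' (k + 1)

def pvStrat1B (t : List Char) (max_len : Int) : List (List Char) → Option (List Char)
  | [] => none
  | sep :: seps =>
    if PySem.Chars.isIn sep t then
      let parts := PySem.Chars.splitOnMax t sep 1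
      let main := parts.headD []
      let sub := parts.getD 1 []
      if 25 ≤ (main.length : Int) ∧ (main.length : Int) ≤ max_len then some main
      else if 10 < max_len - main.length - sep.length then
        let words := PySem.Chars.split₀ sub
        let k := pvFit max_len words ((main.length : Int) + sep.length) 0
        if 0 < k then some (PySem.Chars.join sep [main, PySem.Chars.join [' '] (words.take k)])
        else some (PySem.List.slice main none (some max_len))
      else pvStrat1B t max_len seps
    else pvStrat1B t max_len seps

def trim_title_alt (title : String) (max_len : Int) : String :=
  let t := title.toList
  if (t.length : Int) ≤ max_len then title
  else
    match pvStrat1B t max_len pvSeps with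
    | some r => String.ofList r
    | none =>
      let words := PySem.Chars.split₀ t
      let k := min words.length (max 3 (pvFit max_len words 0 0))
      String.ofList (PySem.Chars.join [' '] (words.take k))

-- ===== PRECONDITION & SPEC =====
def Spec_trim_title (title : String) (max_len : Int) (out : String) : Prop := out = trim_title_alt title max_len
instance (title : String) (max_len : Int) (out : String) : Decidable (Spec_trim_title title max_len out) := by unfold Spec_trim_title; infer_instance

-- ===== CLAIM (what is proved, stated in full; the proofs are below) =====
def Claim_equal_trim_title : Prop := ∀ (title : String) (max_len : Int), Dom_trim_title title max_len → Spec_trim_title title max_len (trim_title title max_len)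

-- ===== LEMMAS AND PROOFS =====

-- length of ' '.join after appending one word
theorem pvL_snoc : ∀ (ws : List (List Char)) (w : List Char),
    (PySem.Chars.join [' '] (ws ++ [w])).length
      = (PySem.Chars.join [' '] ws).length + w.length + (if ws = [] then 0 else 1)
  | [], w => by simp [PySem.Chars.join_singleton, PySem.Chars.join_nil]
  | [a], w => by
      simp [PySem.Chars.join_cons_cons, PySem.Chars.join_singleton]
      omega
  | a :: b :: ws, w => by
      have ih := pvL_snoc (b :: ws) w
      simp only [List.cons_append, PySem.Chars.join_cons_cons, List.length_append] at ih ⊢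
      simp at ih ⊢
      omega

-- length of sep.join([main, x])
theorem pvJoin2_len (sep main x : List Char) :
    (PySem.Chars.join sep [main, x]).length = main.length + sep.length + x.length := by
  simp [PySem.Chars.join_cons_cons, PySem.Chars.join_singleton]
  omega

theorem pvFit_ge (max_len : Int) (ws : List (List Char)) : ∀ (run : Int) (k : Nat),
    k ≤ pvFit max_len ws run k := by
  induction ws with
  | nil => intro run k; simp [pvFit]
  | cons w ws ih =>
    intro run k
    rw [pvFit]
    by_cases hc : max_len < run + (w.length : Int) + (if 0 < k then 1 else 0)
    · rw [if_pos hc]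
    · rw [if_neg hc]
      exact le_trans (Nat.le_succ k) (ih _ (k + 1))

theorem pvFit_le (max_len : Int) (ws : List (List Char)) : ∀ (run : Int) (k : Nat),
    pvFit max_len ws run k ≤ k + ws.length := by
  induction ws with
  | nil => intro run k; simp [pvFit]
  | cons w ws ih =>
    intro run k
    rw [pvFit]
    by_cases hc : max_len < run + (w.length : Int) + (if 0 < k then 1 else 0)
    · rw [if_pos hc]; simp
    · rw [if_neg hc]
      have := ih (run + (w.length : Int) + (if 0 < k then 1 else 0)) (k + 1)
      simp only [List.length_cons]
      omega

-- A's inner fitting loop returns the prefix of the length computed by B's _fit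
theorem pvTryFit_eq_fit (sep main : List Char) (max_len : Int) :
    ∀ (ws acc : List (List Char)),
      pvTryFitA sep main max_len ws acc
        = acc ++ ws.take (pvFit max_len ws
            ((main.length : Int) + sep.length + ((PySem.Chars.join [' '] acc).length : Int))
            acc.length - acc.length)
  | [], acc => by simp [pvTryFitA, pvFit]
  | w :: ws, acc => by
    rw [pvTryFitA, pvFit]
    have hlen : ((PySem.Chars.join sep [main, PySem.Chars.join [' '] (acc ++ [w])]).length : Int)
        = (main.length : Int) + sep.length + ((PySem.Chars.join [' '] acc).length : Int)
          + w.length + (if 0 < acc.length then 1 else 0) := by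
      rw [pvJoin2_len, pvL_snoc]
      rcases acc with _ | ⟨a, acc⟩
      · simp
      · simp; ring
    by_cases h : ((PySem.Chars.join sep [main, PySem.Chars.join [' '] (acc ++ [w])]).length : Int) ≤ max_len
    · rw [if_pos h, if_neg (by rw [hlen] at h; omega)]
      rw [pvTryFit_eq_fit sep main max_len ws (acc ++ [w])]
      have hrun : (main.length : Int) + sep.length + ((PySem.Chars.join [' '] (acc ++ [w])).length : Int)
          = (main.length : Int) + sep.length + ((PySem.Chars.join [' '] acc).length : Int)
            + w.length + (if 0 < acc.length then 1 else 0) := by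
        rw [pvL_snoc];
        rcases acc with _ | ⟨a, acc⟩
        · simp
        · simp; ring
      rw [List.length_append, List.length_singleton, hrun]
      set f := pvFit max_len ws ((main.length : Int) + sep.length + ((PySem.Chars.join [' '] acc).length : Int)
            + w.length + (if 0 < acc.length then 1 else 0)) (acc.length + 1) with hf
      have hge : acc.length + 1 ≤ f := pvFit_ge max_len ws _ _
      have h1 : f - acc.length = (f - (acc.length + 1)) + 1 := by omega
      rw [h1, List.take_succ_cons, List.append_assoc, List.singleton_append]
    · rw [if_neg h, if_pos (by rw [hlen] at h; omega)]
      simp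
  termination_by ws _ => ws.length

-- the two per-separator scans agree
theorem pvStrat1_eq (t : List Char) (max_len : Int) :
    ∀ seps, pvStrat1A t max_len seps = pvStrat1B t max_len seps
  | [] => rfl
  | sep :: seps => by
    rw [pvStrat1A, pvStrat1B]
    by_cases hin : PySem.Chars.isIn sep t = true
    · simp only [hin, if_true]
      set main := (PySem.Chars.splitOnMax t sep 1).headD [] with hmain
      set sub := (PySem.Chars.splitOnMax t sep 1).getD 1 [] with hsub
      by_cases h1 : (main.length : Int) ≤ max_len ∧ 25 ≤ (main.length : Int)
      · rw [if_pos h1, if_pos ⟨h1.2, h1.1⟩]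
      · have h1' : ¬ (25 ≤ (main.length : Int) ∧ (main.length : Int) ≤ max_len) :=
          fun hh => h1 ⟨hh.2, hh.1⟩
        rw [if_neg h1, if_neg h1']
        by_cases h2 : 10 < max_len - (main.length : Int) - (sep.length : Int)
        · rw [if_pos h2]
          set words := PySem.Chars.split₀ sub with hwords
          have hsh : pvTryFitA sep main max_len words []
              = words.take (pvFit max_len words ((main.length : Int) + sep.length) 0) := by
            have h0 := pvTryFit_eq_fit sep main max_len words []
            simpa [PySem.Chars.join_nil] using h0
          rw [hsh]
          set k := pvFit max_len words ((main.length : Int) + sep.length) 0 with hk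
          have hkle : k ≤ words.length := by
            have := pvFit_le max_len words ((main.length : Int) + sep.length) 0
            omega
          by_cases hk0 : 0 < k
          · have hne : words.take k ≠ [] := by
              rcases words with _ | ⟨w, ws⟩
              · simp at hkle; omega
              · rcases k with _ | k
                · omega
                · simp [List.take_succ_cons]
            rw [if_pos hne, if_pos hk0, if_pos h2]
          · have hz : k = 0 := by omega
            rw [if_neg (by rw [hz]; simp), if_neg hk0, if_pos h2]
        · rw [if_neg h2, if_neg h2]
          exact pvStrat1_eq t max_len seps
    · simp only [Bool.not_eq_true] at hin
      simp only [hin, Bool.false_eq_true, if_false]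
      exact pvStrat1_eq t max_len seps

-- join-length is monotone on prefixes
theorem pvL_take_mono (xs : List (List Char)) :
    ∀ i j, i ≤ j →
      (PySem.Chars.join [' '] (xs.take i)).length ≤ (PySem.Chars.join [' '] (xs.take j)).length := by
  have step : ∀ i, (PySem.Chars.join [' '] (xs.take i)).length
      ≤ (PySem.Chars.join [' '] (xs.take (i + 1))).length := by
    intro i
    by_cases h : i < xs.length
    · rw [List.take_add_one, xs.getElem?_eq_getElem h]
      simp only [Option.toList_some]
      rw [pvL_snoc]
      omega
    · rw [List.take_of_length_le (by omega), List.take_of_length_le (by omega)]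
  intro i j hij
  induction j with
  | zero => simp_all
  | succ j ih =>
    rcases Nat.lt_or_ge i (j + 1) with h | h
    · exact le_trans (ih (by omega)) (step j)
    · have : i = j + 1 := by omega
      subst this; exact le_refl _

-- characterisation of B's _fit: it is the largest prefix that still fits
theorem pvFit_char (max_len : Int) (words : List (List Char)) :
    ∀ (ws acc : List (List Char)), words = acc ++ ws →
      (0 < acc.length → ((PySem.Chars.join [' '] acc).length : Int) ≤ max_len) →
      acc.length ≤ pvFit max_len ws ((PySem.Chars.join [' '] acc).length : Int) acc.length ∧
      pvFit max_len ws ((PySem.Chars.join [' '] acc).length : Int) acc.length ≤ words.length ∧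
      (0 < pvFit max_len ws ((PySem.Chars.join [' '] acc).length : Int) acc.length →
        ((PySem.Chars.join [' ']
          (words.take (pvFit max_len ws ((PySem.Chars.join [' '] acc).length : Int) acc.length))).length : Int) ≤ max_len) ∧
      (∀ j, pvFit max_len ws ((PySem.Chars.join [' '] acc).length : Int) acc.length < j →
        j ≤ words.length → max_len < ((PySem.Chars.join [' '] (words.take j)).length : Int))
  | [], acc => by
    intro hw hacc
    subst hw
    simp only [pvFit, List.append_nil]
    refine ⟨Nat.le_refl _, by simp, ?_, ?_⟩
    · intro h0; rw [List.take_length]; exact hacc h0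
    · intro j h1 h2; omega
  | w :: ws, acc => by
    intro hw hacc
    rw [pvFit]
    have hsnoc : ((PySem.Chars.join [' '] (acc ++ [w])).length : Int)
        = ((PySem.Chars.join [' '] acc).length : Int) + w.length + (if 0 < acc.length then 1 else 0) := by
      rw [pvL_snoc];
      rcases acc with _ | ⟨a, acc⟩
      · simp
      · simp
    have htake1 : words.take (acc.length + 1) = acc ++ [w] := by
      rw [hw, List.take_append]; simp
    have hlen : acc.length + 1 ≤ words.length := by rw [hw]; simp
    by_cases hov : max_len < ((PySem.Chars.join [' '] acc).length : Int) + w.length + (if 0 < acc.length then 1 else 0)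
    · rw [if_pos hov]
      refine ⟨Nat.le_refl _, by omega, ?_, ?_⟩
      · intro h0
        have htk : words.take acc.length = acc := by
          rw [hw, List.take_append]; simp
        rw [htk]
        exact hacc h0
      · intro j hj1 hj2
        have hmono := pvL_take_mono words (acc.length + 1) j (by omega)
        have hmono' : ((PySem.Chars.join [' '] (words.take (acc.length + 1))).length : Int)
            ≤ ((PySem.Chars.join [' '] (words.take j)).length : Int) := by exact_mod_cast hmono
        rw [htake1, hsnoc] at hmono'
        omega
    · rw [if_neg hov]
      have hrec := pvFit_char max_len words ws (acc ++ [w])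
        (by rw [hw]; simp) (by intro _; rw [hsnoc]; omega)
      rw [List.length_append, List.length_singleton] at hrec
      rw [hsnoc] at hrec
      exact ⟨le_trans (by omega) hrec.1, hrec.2.1, hrec.2.2.1, hrec.2.2.2⟩
  termination_by ws _ => ws.length

-- A's pop loop computes B's closed-form cut on every prefix of the word list
theorem pvPopLoop_eq (max_len : Int) (words : List (List Char)) :
    ∀ m, m ≤ words.length →
      pvPopLoopA max_len (words.take m)
        = words.take (min m (max 3 (pvFit max_len words 0 0))) := by
  have hchar := pvFit_char max_len words words [] (by simp) (by simp)
  rw [show ((PySem.Chars.join [' '] ([] : List (List Char))).length : Int) = 0 by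
    simp [PySem.Chars.join_nil]] at hchar
  simp only [List.length_nil] at hchar
  set f := pvFit max_len words (0 : Int) 0 with hf
  obtain ⟨-, hfle, hfit, hbig⟩ := hchar
  intro m
  induction m with
  | zero =>
    intro _
    rw [pvPopLoopA]
    simp
  | succ m ih =>
    intro hm
    rw [pvPopLoopA]
    have hlen : (words.take (m + 1)).length = m + 1 := by
      rw [List.length_take]; omega
    by_cases hc : max_len < ((PySem.Chars.join [' '] (words.take (m + 1))).length : Int) ∧ 3 < (words.take (m + 1)).length
    · rw [dif_pos hc]
      have h3 : 3 < m + 1 := by rw [hlen] at hc; exact hc.2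
      have hdrop : (words.take (m + 1)).dropLast = words.take m := by
        rw [List.dropLast_eq_take, hlen, List.take_take]
        simp
      rw [hdrop, ih (by omega)]
      have hflt : f < m + 1 := by
        by_contra hge
        rw [Nat.not_lt] at hge
        have h0f : 0 < f := by omega
        have hmono := pvL_take_mono words (m + 1) f (by omega)
        have hle := hfit h0f
        have hmono' : ((PySem.Chars.join [' '] (words.take (m + 1))).length : Int)
            ≤ ((PySem.Chars.join [' '] (words.take f)).length : Int) := by exact_mod_cast hmono
        have := hc.1
        omega
      have hmin : min m (max 3 f) = min (m + 1) (max 3 f) := by omega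
      rw [hmin]
    · rw [dif_neg hc]
      have hle : m + 1 ≤ max 3 f := by
        rw [hlen] at hc
        by_cases h3 : 3 < m + 1
        · have hnl : ¬ max_len < ((PySem.Chars.join [' '] (words.take (m + 1))).length : Int) := by
            intro h; exact hc ⟨h, h3⟩
          have hnf : ¬ f < m + 1 := fun hlt => absurd (hbig (m + 1) hlt hm) (by omega)
          omega
        · omega
      rw [min_eq_left (by omega)]

-- ===== VERDICT (by name: the statement is the Claim_ definition above) =====
theorem trim_title_spec : Claim_equal_trim_title := by
  intro title max_len _
  unfold Spec_trim_title trim_title trim_title_alt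
  simp only []
  by_cases h : ((title.toList.length : Int) ≤ max_len)
  · rw [if_pos h, if_pos h]
  · rw [if_neg h, if_neg h, pvStrat1_eq]
    cases hs : pvStrat1B title.toList max_len pvSeps with
    | some r => rfl
    | none =>
      simp only []
      have hp := pvPopLoop_eq max_len (PySem.Chars.split₀ title.toList)
        (PySem.Chars.split₀ title.toList).length (Nat.le_refl _)
      rw [List.take_length] at hp
      rw [hp]
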